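-- pv_equiv track=rewrite | github.com/logreg-n-coffee/daily-coding-problems-python | question_314.py | find_min_range
-- ===== SOURCE A (Python) =====
-- def find_min_range(listeners: list[int], towers: list[int]) -> int:
--     listeners.sort()
--     towers.sort()
--
--     min_range = 0  # To store the minimum range needed to cover all listeners
--
--     # Loop through all listeners
--     for listener in listeners:
--         # Calculate the minimum distance to a tower for this listener
--         # Initialize to a very large value
--         closest_tower_distance = float("inf")
--
--         for tower in towers:
--             distance = abs(tower - listener)
--             closest_tower_distance = min(closest_tower_distance, distance)
--
--         # Update the minimum range needed to cover all listeners
--         min_range = int(max(min_range, closest_tower_distance))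
--
--     return min_range
-- ===== SOURCE B (Python) =====
-- def find_min_range(listeners: list[int], towers: list[int]) -> int:
--     # Sort the towers once, then binary-search (bisect_left, hand-written since
--     # no imports are used) the nearest tower for each listener: O((L+T) log T).
--     ts = sorted(towers)
--     n = len(ts)
--     best = 0
--     for listener in listeners:
--         lo, hi = 0, n
--         while lo < hi:
--             mid = (lo + hi) // 2
--             if ts[mid] < listener:
--                 lo = mid + 1
--             else:
--                 hi = mid
--         if lo == n:
--             d = listener - ts[n - 1]
--         elif lo == 0:
--             d = ts[0] - listener
--         else:
--             d = min(ts[lo] - listener, listener - ts[lo - 1])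
--         best = max(best, d)
--     return best
-- ===== Notes on version B (the rewrite author's own statement) =====
-- stated objective: faster
-- what changed: Replaces the inner linear scan over all towers per listener by a single sort of the towers followed by a hand-written bisect_left binary search per listener (nearest tower = min of the two neighbours of the insertion point).
import Mathlib
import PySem

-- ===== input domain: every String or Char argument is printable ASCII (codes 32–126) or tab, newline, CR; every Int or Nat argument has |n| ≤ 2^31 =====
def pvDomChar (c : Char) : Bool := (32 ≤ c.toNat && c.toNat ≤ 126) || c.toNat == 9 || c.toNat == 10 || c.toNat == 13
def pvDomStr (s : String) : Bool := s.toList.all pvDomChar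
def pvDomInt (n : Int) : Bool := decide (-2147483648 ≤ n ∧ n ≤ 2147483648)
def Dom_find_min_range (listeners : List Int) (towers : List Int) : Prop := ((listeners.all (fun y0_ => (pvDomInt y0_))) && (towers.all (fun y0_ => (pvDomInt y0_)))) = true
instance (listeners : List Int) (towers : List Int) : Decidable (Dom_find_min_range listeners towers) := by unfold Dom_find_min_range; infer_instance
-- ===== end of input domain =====

-- B replaces A's inner linear scan over all towers per listener by one sort of the towers
-- plus a bisect_left binary search per listener (objective: faster). Return-value
-- equivalence only: Python A sorts both argument lists IN PLACE, B does not mutate them.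

-- ===== PORT A =====
-- closest_tower_distance starts as float("inf"); modelled as Option Int with none = inf
-- (min(inf, d) = d; int(max(min_range, inf)) raises OverflowError — excluded by Pre_).
def find_min_range (listeners : List Int) (towers : List Int) : Int :=
  let ls := PySem.List.sorted listeners (fun x => x)
  let ts := PySem.List.sorted towers (fun x => x)
  ls.foldl (fun min_range listener =>
    let closest := ts.foldl (fun closest tower =>
      match closest with
      | none => some |tower - listener|
      | some m => some (min m |tower - listener|)) (none : Option Int)
    match closest with
    | none => min_range               -- unreachable under Pre_ (Python raises OverflowError here)
    | some d => max min_range d) 0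

-- ===== PORT B =====
-- Source B's hand-written lo/hi while-loop is exactly bisect_left, ported with the prelude
-- primitive PySem.List.bisectLeft (PYSEM.md forbids hand-rolling it). ts.getD i 0 ports
-- ts[i]: every index used is in range whenever its branch runs under Pre_ (towers ≠ []),
-- so getD is exact there.
def find_min_range_alt (listeners : List Int) (towers : List Int) : Int :=
  let ts := PySem.List.sorted towers (fun x => x)
  let n := ts.length
  listeners.foldl (fun best listener =>
    let lo := PySem.List.bisectLeft ts listener
    let d : Int :=
      if lo = n then listener - ts.getD (n - 1) 0
      else if lo = 0 then ts.getD 0 0 - listener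
      else min (ts.getD lo 0 - listener) (listener - ts.getD (lo - 1) 0)
    max best d) 0

-- ===== PRECONDITION & SPEC =====
-- Pre_ excludes towers = [] with listeners ≠ []: there Python A raises OverflowError
-- (int(float("inf"))) and Python B raises IndexError, so neither returns.
def Pre_find_min_range (listeners : List Int) (towers : List Int) : Prop :=
  listeners = [] ∨ towers ≠ []
instance (listeners : List Int) (towers : List Int) : Decidable (Pre_find_min_range listeners towers) := by unfold Pre_find_min_range; infer_instance

def pvWitness_find_min_range : List Int × List Int := ([1, 5, 11, 20], [4, 8, 15])

def Spec_find_min_range (listeners : List Int) (towers : List Int) (out : Int) : Prop := out = find_min_range_alt listeners towers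
instance (listeners : List Int) (towers : List Int) (out : Int) : Decidable (Spec_find_min_range listeners towers out) := by unfold Spec_find_min_range; infer_instance

-- ===== CLAIM (what is proved, stated in full; the proofs are below) =====
def Claim_equal_find_min_range : Prop := ∀ (listeners : List Int) (towers : List Int), Dom_find_min_range listeners towers → Pre_find_min_range listeners towers → Spec_find_min_range listeners towers (find_min_range listeners towers)

-- ===== LEMMAS AND PROOFS =====

-- B's per-listener nearest-tower distance (rfl-equal to the body of find_min_range_alt).
def pvBDist (ts : List Int) (x : Int) : Int :=
  if PySem.List.bisectLeft ts x = ts.length then x - ts.getD (ts.length - 1) 0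
  else if PySem.List.bisectLeft ts x = 0 then ts.getD 0 0 - x
  else min (ts.getD (PySem.List.bisectLeft ts x) 0 - x) (x - ts.getD (PySem.List.bisectLeft ts x - 1) 0)

lemma pv_mono (ts : List Int) (hsort : ts.Pairwise (· ≤ ·)) :
    ∀ i j (hi : i < ts.length) (hj : j < ts.length), i ≤ j → ts[i] ≤ ts[j] := by
  intro i j hi hj hij
  rcases Nat.lt_or_eq_of_le hij with h | h
  · exact List.pairwise_iff_getElem.1 hsort i j hi hj h
  · subst h; exact le_refl _

-- pvBDist is the distance to some actual tower …
lemma pvBDist_achieved (ts : List Int) (hne : ts ≠ []) (hsort : ts.Pairwise (· ≤ ·)) (x : Int) :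
    ∃ j, ∃ (hj : j < ts.length), pvBDist ts x = |ts[j] - x| := by
  have hn : 0 < ts.length := List.length_pos_iff.2 hne
  obtain ⟨hlo, h1, h2⟩ := PySem.List.bisectLeft_spec ts x hsort
  set lo := PySem.List.bisectLeft ts x with hlodef
  unfold pvBDist
  rw [← hlodef]
  split_ifs with hA hB
  · -- lo = n
    have hj : ts.length - 1 < ts.length := by omega
    refine ⟨ts.length - 1, hj, ?_⟩
    have := h1 (ts.length - 1) hj (by omega)
    rw [List.getD_eq_getElem ts 0 hj, abs_sub_comm, abs_of_nonneg (by omega)]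
  · -- lo = 0
    refine ⟨0, hn, ?_⟩
    have := h2 0 hn (by omega)
    rw [List.getD_eq_getElem ts 0 hn, abs_of_nonneg (by omega)]
  · have hlt : lo < ts.length := by omega
    have hpos : 0 < lo := by omega
    have hjm : lo - 1 < ts.length := by omega
    have hge := h2 lo hlt (by omega)
    have hltx := h1 (lo - 1) hjm (by omega)
    rcases le_total (ts.getD lo 0 - x) (x - ts.getD (lo - 1) 0) with h | h
    · refine ⟨lo, hlt, ?_⟩
      rw [min_eq_left h, List.getD_eq_getElem ts 0 hlt, abs_of_nonneg (by omega)]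
    · refine ⟨lo - 1, hjm, ?_⟩
      rw [min_eq_right h, List.getD_eq_getElem ts 0 hjm, abs_sub_comm, abs_of_nonneg (by omega)]

-- … and is a lower bound on the distance to every tower.
lemma pvBDist_le (ts : List Int) (hne : ts ≠ []) (hsort : ts.Pairwise (· ≤ ·)) (x : Int) :
    ∀ j (hj : j < ts.length), pvBDist ts x ≤ |ts[j] - x| := by
  intro j hj
  have hn : 0 < ts.length := List.length_pos_iff.2 hne
  obtain ⟨hlo, h1, h2⟩ := PySem.List.bisectLeft_spec ts x hsort
  set lo := PySem.List.bisectLeft ts x with hlodef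
  unfold pvBDist
  rw [← hlodef]
  rcases Nat.lt_or_ge j lo with hjlo | hjlo
  · -- ts[j] < x
    have hxj := h1 j hj hjlo
    have habs : |ts[j] - x| = x - ts[j] := by rw [abs_sub_comm, abs_of_nonneg (by omega)]
    rw [habs]
    have hlopos : lo ≠ 0 := by omega
    split_ifs with hA
    · have hjm : ts.length - 1 < ts.length := by omega
      rw [List.getD_eq_getElem ts 0 hjm]
      have := pv_mono ts hsort j (ts.length - 1) hj hjm (by omega)
      omega
    · have hjm : lo - 1 < ts.length := by omega
      have hmono := pv_mono ts hsort j (lo - 1) hj hjm (by omega)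
      rw [List.getD_eq_getElem ts 0 hjm] at *
      calc min (ts.getD lo 0 - x) (x - ts[lo-1]) ≤ x - ts[lo-1] := min_le_right _ _
        _ ≤ x - ts[j] := by omega
  · -- x ≤ ts[j]
    have hxj := h2 j hj hjlo
    have habs : |ts[j] - x| = ts[j] - x := abs_of_nonneg (by omega)
    rw [habs]
    have hlon : lo ≠ ts.length := by omega
    split_ifs with hB hC
    · exact absurd hB hlon
    · have := pv_mono ts hsort 0 j hn hj (by omega)
      rw [List.getD_eq_getElem ts 0 hn]
      omega
    · have hlt : lo < ts.length := by omega
      have hmono := pv_mono ts hsort lo j hlt hj hjlo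
      rw [List.getD_eq_getElem ts 0 hlt]
      calc min (ts[lo] - x) (x - ts.getD (lo-1) 0) ≤ ts[lo] - x := min_le_left _ _
        _ ≤ ts[j] - x := by omega

-- A's inner Option fold, once seeded with a first distance, is an Int fold of min.
lemma pvOptFold_some (ts : List Int) (x : Int) (a : Int) :
    ts.foldl (fun closest tower =>
      match closest with
      | none => some |tower - x|
      | some m => some (min m |tower - x|)) (some a)
    = some (List.foldl min a (ts.map (fun t => |t - x|))) := by
  induction ts generalizing a with
  | nil => rfl
  | cons t ts ih => simp [List.foldl, ih]

-- Core: on sorted nonempty towers, A's scanned minimum distance = B's bisect answer.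
lemma pvNearest_eq (ts : List Int) (hne : ts ≠ [])
    (hsort : ts.Pairwise (· ≤ ·)) (x : Int) :
    ts.foldl (fun closest tower =>
      match closest with
      | none => some |tower - x|
      | some m => some (min m |tower - x|)) none = some (pvBDist ts x) := by
  obtain ⟨t, rest, rfl⟩ := List.exists_cons_of_ne_nil hne
  rw [List.foldl_cons,
    show (match (none : Option Int) with
      | none => some |t - x|
      | some m => some (min m |t - x|)) = some |t - x| from rfl,
    pvOptFold_some]
  congr 1
  set M := List.foldl min |t - x| (rest.map (fun u => |u - x|)) with hM
  obtain ⟨hMinit, hMle⟩ := PySem.List.foldl_min_le (rest.map (fun u => |u - x|)) |t - x|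
  have hub : ∀ u ∈ t :: rest, M ≤ |u - x| := by
    intro u hu
    rcases List.mem_cons.1 hu with rfl | hu
    · exact hMinit
    · exact hMle _ (List.mem_map_of_mem hu)
  have hmem : ∃ u ∈ t :: rest, M = |u - x| := by
    rcases PySem.List.foldl_min_mem (rest.map (fun u => |u - x|)) |t - x| with h | h
    · exact ⟨t, List.mem_cons_self, h⟩
    · obtain ⟨u, hu, hux⟩ := List.mem_map.1 h
      exact ⟨u, List.mem_cons_of_mem _ hu, hux.symm⟩
  apply le_antisymm
  · obtain ⟨j, hj, heq⟩ := pvBDist_achieved (t :: rest) hne hsort x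
    rw [heq]
    exact hub _ (List.getElem_mem hj)
  · obtain ⟨u, hu, hMu⟩ := hmem
    obtain ⟨j, hj, rfl⟩ := List.mem_iff_getElem.1 hu
    rw [hMu]
    exact pvBDist_le (t :: rest) hne hsort x j hj

lemma pvAlt_eq (listeners towers : List Int) :
    find_min_range_alt listeners towers =
      listeners.foldl (fun best l =>
        max best (pvBDist (PySem.List.sorted towers (fun x => x)) l)) 0 := rfl

theorem pv_main (listeners towers : List Int)
    (hpre : Pre_find_min_range listeners towers) :
    find_min_range listeners towers = find_min_range_alt listeners towers := by
  by_cases hl : listeners = []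
  · subst hl
    rfl
  · have ht : towers ≠ [] := hpre.resolve_left hl
    have hts_ne : PySem.List.sorted towers (fun x => x) ≠ [] := by
      intro h
      exact ht ((PySem.List.sorted_eq_nil_iff towers (fun x => x) false).1 h)
    have hsort : (PySem.List.sorted towers (fun x => x)).Pairwise (· ≤ ·) :=
      PySem.List.sorted_pairwise towers (fun x => x)
    rw [pvAlt_eq]
    unfold find_min_range
    simp only [pvNearest_eq _ hts_ne hsort]
    -- the outer running max is invariant under A's sorting of the listeners
    haveI : RightCommutative
        (fun (b : Int) (a : Int) => max b (pvBDist (PySem.List.sorted towers (fun x => x)) a)) :=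
      ⟨fun b a a' => by simp [max_right_comm]⟩
    exact List.Perm.foldl_eq (PySem.List.sorted_perm listeners (fun x => x) false) 0

-- ===== VERDICT (by name: the statement is the Claim_ definition above) =====
theorem find_min_range_spec : Claim_equal_find_min_range := by
  intro listeners towers _ hpre
  unfold Spec_find_min_range
  exact pv_main listeners towers hpre
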